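-- pv_equiv track=rewrite | github.com/svdeepak99/Sliding_Block-BFS-A_Star-Pattern_Database_Heuristic | Pattern_Database_3x3.py | valid_actions
-- ===== SOURCE A (Python) =====
-- def valid_actions(state):
--     valids = []
--     size = len(state)
--     flat = [x for y in state for x in y]
--     ind = flat.index(0)
--     pos = (ind // size, ind % size)
--     if size == 3:
--         if pos[1] == 0:
--             valids += [0, 1]     # L1, L2 valid
--         elif pos[1] == 1:
--             valids.append(0)    # Only L1 valid
--
--         if pos[0] == 0:
--             valids += [2, 3]     # U1, U2 valid
--         elif pos[0] == 1:
--             valids.append(2)    # Only U1 valid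
--
--         if pos[1] == 2:
--             valids += [4, 5]     # R1, R2 valid
--         elif pos[1] == 1:
--             valids.append(4)    # Only R1 valid
--
--         if pos[0] == 2:
--             valids += [6, 7]     # D1, D2 valid
--         elif pos[0] == 1:
--             valids.append(6)    # Only D1 valid
--     elif size == 4:
--         if pos[1] == 0:
--             valids += [0, 1, 2]     # L1, L2, L3 valid
--         elif pos[1] == 1:
--             valids += [0, 1]        # L1, L2 valid
--         elif pos[1] == 2:
--             valids.append(0)        # Only L1 valid
--
--         if pos[0] == 0:
--             valids += [3, 4, 5]     # U1, U2, U3 valid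
--         elif pos[0] == 1:
--             valids += [3, 4]        # U1, U2 valid
--         elif pos[0] == 2:
--             valids.append(3)        # Only U1 valid
--
--         if pos[1] == 3:
--             valids += [6, 7, 8]     # R1, R2, R3 valid
--         elif pos[1] == 2:
--             valids += [6, 7]        # R1, R2 valid
--         elif pos[1] == 1:
--             valids.append(6)        # Only R1 valid
--
--         if pos[0] == 3:
--             valids += [9, 10, 11]   # D1, D2, D3 valid
--         elif pos[0] == 2:
--             valids += [9, 10]       # D1, D2 valid
--         elif pos[0] == 1:
--             valids.append(9)        # Only D1 valid
--
--     return valids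
-- ===== SOURCE B (Python) =====
-- def valid_actions(state):
--     size = len(state)
--     flat = [x for y in state for x in y]
--     ind = flat.index(0)
--     pos = (ind // size, ind % size)
--     valids = []
--     if size in (3, 4):
--         step = size - 1
--         for base, count in zip((0, step, 2 * step, 3 * step),
--                                (step - pos[1], step - pos[0], pos[1], pos[0])):
--             if 0 <= count <= step:
--                 valids.extend(range(base, base + count))
--     return valids
-- ===== Notes on version B (the rewrite author's own statement) =====
-- stated objective: simpler
-- what changed: Replaces the two hand-enumerated per-size if/elif ladders (4 x 3-4 branches of literal lists) by one uniform rule: for size 3 or 4 iterate over the four directions with bases 0,step,2*step,3*step and counts step-col, step-row, col, row, extending with range(base, base+count) whenever the count is a legal number of slides (between 0 and step).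
import Mathlib
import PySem

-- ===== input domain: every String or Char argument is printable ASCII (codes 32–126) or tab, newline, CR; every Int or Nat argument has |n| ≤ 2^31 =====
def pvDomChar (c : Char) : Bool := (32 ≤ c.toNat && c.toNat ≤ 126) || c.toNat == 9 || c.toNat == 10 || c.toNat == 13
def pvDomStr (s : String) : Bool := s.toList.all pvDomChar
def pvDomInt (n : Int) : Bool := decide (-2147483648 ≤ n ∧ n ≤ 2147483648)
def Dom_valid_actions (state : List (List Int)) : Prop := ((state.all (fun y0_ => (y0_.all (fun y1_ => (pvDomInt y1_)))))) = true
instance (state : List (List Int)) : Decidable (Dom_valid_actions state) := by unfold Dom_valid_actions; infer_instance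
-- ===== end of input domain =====

-- B replaces A's two hand-enumerated per-size if/elif ladders by one uniform
-- direction/count rule (objective: simpler).

-- ===== PORT A =====
def valid_actions (state : List (List Int)) : List Int :=
  let valids : List Int := []
  let size : Int := state.length
  let flat : List Int := state.flatMap (fun y => y)
  match PySem.List.index? flat 0 with
  | none => []  -- flat.index(0) raises ValueError; excluded by Pre_
  | some i =>
    let ind : Int := i
    let pos : Int × Int := (PySem.Int.floordiv ind size, PySem.Int.mod ind size)
    if size = 3 then
      let valids := if pos.2 = 0 then valids ++ [0, 1] else if pos.2 = 1 then valids ++ [0] else valids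
      let valids := if pos.1 = 0 then valids ++ [2, 3] else if pos.1 = 1 then valids ++ [2] else valids
      let valids := if pos.2 = 2 then valids ++ [4, 5] else if pos.2 = 1 then valids ++ [4] else valids
      let valids := if pos.1 = 2 then valids ++ [6, 7] else if pos.1 = 1 then valids ++ [6] else valids
      valids
    else if size = 4 then
      let valids := if pos.2 = 0 then valids ++ [0, 1, 2] else if pos.2 = 1 then valids ++ [0, 1] else if pos.2 = 2 then valids ++ [0] else valids
      let valids := if pos.1 = 0 then valids ++ [3, 4, 5] else if pos.1 = 1 then valids ++ [3, 4] else if pos.1 = 2 then valids ++ [3] else valids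
      let valids := if pos.2 = 3 then valids ++ [6, 7, 8] else if pos.2 = 2 then valids ++ [6, 7] else if pos.2 = 1 then valids ++ [6] else valids
      let valids := if pos.1 = 3 then valids ++ [9, 10, 11] else if pos.1 = 2 then valids ++ [9, 10] else if pos.1 = 1 then valids ++ [9] else valids
      valids
    else valids

-- ===== PORT B =====
def valid_actions_alt (state : List (List Int)) : List Int :=
  let size : Int := state.length
  let flat : List Int := state.flatMap (fun y => y)
  match PySem.List.index? flat 0 with
  | none => []  -- flat.index(0) raises ValueError as in A; excluded by Pre_
  | some i =>
    let ind : Int := i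
    let pos : Int × Int := (PySem.Int.floordiv ind size, PySem.Int.mod ind size)
    if size = 3 ∨ size = 4 then
      let step := size - 1
      (List.zip [0, step, 2 * step, 3 * step]
                [step - pos.2, step - pos.1, pos.2, pos.1]).foldl
        (fun valids bc =>
          if 0 ≤ bc.2 ∧ bc.2 ≤ step then valids ++ PySem.List.pyRange bc.1 (bc.1 + bc.2) 1
          else valids) []
    else []

-- ===== PRECONDITION & SPEC =====
-- Pre_ excludes exactly the inputs where flat.index(0) raises ValueError (no 0 anywhere;
-- this also covers the empty state).
def Pre_valid_actions (state : List (List Int)) : Prop :=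
  0 ∈ state.flatMap (fun y => y)
instance (state : List (List Int)) : Decidable (Pre_valid_actions state) := by
  unfold Pre_valid_actions; infer_instance
def pvWitness_valid_actions : List (List Int) := [[1, 2, 3], [4, 0, 5], [6, 7, 8]]

def Spec_valid_actions (state : List (List Int)) (out : List Int) : Prop :=
  out = valid_actions_alt state
instance (state : List (List Int)) (out : List Int) : Decidable (Spec_valid_actions state out) := by
  unfold Spec_valid_actions; infer_instance

-- ===== CLAIM =====
def Claim_equal_valid_actions : Prop := ∀ (state : List (List Int)), Dom_valid_actions state → Pre_valid_actions state → Spec_valid_actions state (valid_actions state)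

-- ===== LEMMAS AND PROOFS =====

theorem valid_actions_spec : Claim_equal_valid_actions := by
  intro state _ hpre
  obtain ⟨i, hi⟩ := Option.isSome_iff_exists.mp (Iff.mpr (PySem.List.index?_isSome_iff _ _) hpre)
  show valid_actions state = valid_actions_alt state
  simp only [valid_actions, valid_actions_alt, hi]
  by_cases h3 : state.length = 3
  · rw [h3, PySem.Int.floordiv_natCast i 3, PySem.Int.mod_natCast i 3]
    have hq : i % 3 = 0 ∨ i % 3 = 1 ∨ i % 3 = 2 := by omega
    rcases Nat.lt_or_ge (i / 3) 3 with hlt | hge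
    · have hp : i / 3 = 0 ∨ i / 3 = 1 ∨ i / 3 = 2 := by omega
      rcases hp with hp | hp | hp <;> rcases hq with hq | hq | hq <;>
        rw [hp, hq] <;> decide
    · have h0 : ¬((i:Int) / 3 = 0) := by omega
      have h1 : ¬((i:Int) / 3 = 1) := by omega
      have h2 : ¬((i:Int) / 3 = 2) := by omega
      have hG : ¬((i:Int) / 3 ≤ 2 ∧ 0 ≤ (i:Int) / 3) := by omega
      have hG' : ¬(0 ≤ (i:Int) / 3 ∧ (i:Int) / 3 ≤ 2) := by omega
      rcases hq with hq | hq | hq <;> rw [hq] <;>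
        simp [List.zip, List.zipWith, List.foldl, h0, h1, h2, hG, hG'] <;> decide
  · by_cases h4 : state.length = 4
    · rw [h4, PySem.Int.floordiv_natCast i 4, PySem.Int.mod_natCast i 4]
      have hq : i % 4 = 0 ∨ i % 4 = 1 ∨ i % 4 = 2 ∨ i % 4 = 3 := by omega
      rcases Nat.lt_or_ge (i / 4) 4 with hlt | hge
      · have hp : i / 4 = 0 ∨ i / 4 = 1 ∨ i / 4 = 2 ∨ i / 4 = 3 := by omega
        rcases hp with hp | hp | hp | hp <;> rcases hq with hq | hq | hq | hq <;>
          rw [hp, hq] <;> decide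
      · have h0 : ¬((i:Int) / 4 = 0) := by omega
        have h1 : ¬((i:Int) / 4 = 1) := by omega
        have h2 : ¬((i:Int) / 4 = 2) := by omega
        have h3' : ¬((i:Int) / 4 = 3) := by omega
        have hG : ¬((i:Int) / 4 ≤ 3 ∧ 0 ≤ (i:Int) / 4) := by omega
        have hG' : ¬(0 ≤ (i:Int) / 4 ∧ (i:Int) / 4 ≤ 3) := by omega
        rcases hq with hq | hq | hq | hq <;> rw [hq] <;>
          simp [List.zip, List.zipWith, List.foldl, h0, h1, h2, h3', hG, hG'] <;> decide
    · have c3 : ¬ ((state.length : Int) = 3) := by omega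
      have c4 : ¬ ((state.length : Int) = 4) := by omega
      rw [if_neg c3, if_neg c4, if_neg (not_or.mpr ⟨c3, c4⟩)]
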